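-- pv_equiv track=rewrite | github.com/Harmitx7/tribunal-kit | .agent/scripts/skill_evolution.py | parse_llm_yaml_response
-- ===== SOURCE A (Python) =====
-- def parse_llm_yaml_response(response: str) -> list[dict]:
--     """Parse structured YAML from LLM response without pyyaml dependency."""
--     idioms = []
--     in_idioms = False
--     current: dict = {}
--
--     for line in response.splitlines():
--         stripped = line.strip()
--         if stripped == "idioms:":
--             in_idioms = True
--             continue
--         if not in_idioms:
--             continue
--         if stripped.startswith("- pattern:"):
--             if current:
--                 idioms.append(current)
--             current = {"pattern": stripped.split(":", 1)[1].strip().strip('"')}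
--         elif stripped.startswith("reason:") and current:
--             current["reason"] = stripped.split(":", 1)[1].strip().strip('"')
--         elif stripped.startswith("domain:") and current:
--             current["domain"] = stripped.split(":", 1)[1].strip().strip('"')
--
--     if current and "pattern" in current:
--         idioms.append(current)
--
--     return idioms
-- ===== SOURCE B (Python) =====
-- def _val(s):
--     return s.split(":", 1)[1].strip().strip('"')
--
--
-- def _blocks(lines):
--     """Segment lines into record-blocks, each starting at a '- pattern:' line."""
--     blocks = []
--     i = 0
--     n = len(lines)
--     while i < n:
--         if lines[i].startswith("- pattern:"):
--             j = i + 1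
--             while j < n and not lines[j].startswith("- pattern:"):
--                 j += 1
--             blocks.append(lines[i:j])
--             i = j
--         else:
--             i += 1
--     return blocks
--
--
-- def _build(block):
--     d = {"pattern": _val(block[0])}
--     for s in block[1:]:
--         if s.startswith("reason:"):
--             d["reason"] = _val(s)
--         elif s.startswith("domain:"):
--             d["domain"] = _val(s)
--     return d
--
--
-- def parse_llm_yaml_response(response: str) -> list[dict]:
--     lines = [ln.strip() for ln in response.splitlines()]
--     if "idioms:" not in lines:
--         return []
--     tail = lines[lines.index("idioms:") + 1:]
--     return [_build(b) for b in _blocks(tail)]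
-- ===== Notes on version B (the rewrite author's own statement) =====
-- stated objective: alternative
-- what changed: Replaces A's single-pass three-field state machine (in_idioms flag, mutable current dict, trailing flush) with a three-phase decomposition: locate the first stripped 'idioms:' line, segment the following stripped lines into '- pattern:'-headed blocks, then build each record dict from its own block.
import Mathlib
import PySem

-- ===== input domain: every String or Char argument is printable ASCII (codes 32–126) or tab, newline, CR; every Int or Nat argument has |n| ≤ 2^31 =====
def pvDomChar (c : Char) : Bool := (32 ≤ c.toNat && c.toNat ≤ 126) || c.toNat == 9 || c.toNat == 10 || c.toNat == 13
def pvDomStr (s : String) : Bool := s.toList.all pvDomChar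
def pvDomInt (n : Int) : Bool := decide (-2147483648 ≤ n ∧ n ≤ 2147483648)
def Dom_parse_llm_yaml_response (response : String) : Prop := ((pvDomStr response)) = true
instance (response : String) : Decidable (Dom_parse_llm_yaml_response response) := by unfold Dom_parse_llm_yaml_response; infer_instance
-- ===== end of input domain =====

-- B re-implements the parser by a different decomposition (find the section start, segment into
-- '- pattern:'-headed blocks, build each record from its block) instead of A's one-pass state machine;
-- objective: alternative structure, same cost.

-- shared: stripped.split(":", 1)[1].strip().strip('"')  (the [1] always exists at its call sites,
-- which are guarded by startswith on a prefix containing ':')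
def pvVal (s : String) : String :=
  PySem.Str.stripChars (PySem.Str.strip (((PySem.Str.splitMax? s ":" 1).getD []).getD 1 "")) "\""

-- ===== PORT A =====
def pvStepA (st : List (PySem.Dict String String) × Bool × PySem.Dict String String)
    (line : String) : List (PySem.Dict String String) × Bool × PySem.Dict String String :=
  let s := PySem.Str.strip line
  if s = "idioms:" then (st.1, true, st.2.2)
  else if !st.2.1 then st
  else if PySem.Str.startswith s "- pattern:" then
    ((if !st.2.2.items.isEmpty then st.1 ++ [st.2.2] else st.1), st.2.1,
      PySem.Dict.ofList [("pattern", pvVal s)])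
  else if PySem.Str.startswith s "reason:" && !st.2.2.items.isEmpty then
    (st.1, st.2.1, st.2.2.insert "reason" (pvVal s))
  else if PySem.Str.startswith s "domain:" && !st.2.2.items.isEmpty then
    (st.1, st.2.1, st.2.2.insert "domain" (pvVal s))
  else st

-- trailing 'if current and "pattern" in current: idioms.append(current)'
def pvFinA (st : List (PySem.Dict String String) × Bool × PySem.Dict String String) :
    List (PySem.Dict String String) :=
  if !st.2.2.items.isEmpty && st.2.2.contains "pattern" then st.1 ++ [st.2.2] else st.1

def parse_llm_yaml_response (response : String) : List (List (String × String)) :=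
  (pvFinA ((PySem.Str.splitlines response).foldl pvStepA ([], false, PySem.Dict.empty))).map
    PySem.Dict.items

-- ===== PORT B =====
def pvIsPat (s : String) : Bool := PySem.Str.startswith s "- pattern:"

-- _blocks: the outer while advances to each '- pattern:' line; the inner while (j) is the
-- takeWhile/dropWhile scan to the next one
def pvBlocks : List String → List (List String)
  | [] => []
  | s :: rest =>
    if pvIsPat s then
      (s :: rest.takeWhile (fun t => !pvIsPat t)) :: pvBlocks (rest.dropWhile (fun t => !pvIsPat t))
    else pvBlocks rest
termination_by l => l.length
decreasing_by
  · have := List.length_dropWhile_le (fun t => !pvIsPat t) rest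
    simp; omega
  · simp

def pvBuildStep (d : PySem.Dict String String) (t : String) : PySem.Dict String String :=
  if PySem.Str.startswith t "reason:" then d.insert "reason" (pvVal t)
  else if PySem.Str.startswith t "domain:" then d.insert "domain" (pvVal t)
  else d

-- _build (blocks are never empty; [] case is unreachable)
def pvBuild : List String → PySem.Dict String String
  | [] => PySem.Dict.empty
  | s :: rest => rest.foldl pvBuildStep (PySem.Dict.ofList [("pattern", pvVal s)])

def parse_llm_yaml_response_alt (response : String) : List (List (String × String)) :=
  let lines := (PySem.Str.splitlines response).map PySem.Str.strip
  match PySem.List.index? lines "idioms:" with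
  | none => []
  | some i => ((pvBlocks (lines.drop (i + 1))).map pvBuild).map PySem.Dict.items

-- ===== PRECONDITION & SPEC =====
def Spec_parse_llm_yaml_response (response : String) (out : List (List (String × String))) : Prop := out = parse_llm_yaml_response_alt response
instance (response : String) (out : List (List (String × String))) : Decidable (Spec_parse_llm_yaml_response response out) := by unfold Spec_parse_llm_yaml_response; infer_instance

-- ===== CLAIM (what is proved, stated in full; the proofs are below) =====
def Claim_equal_parse_llm_yaml_response : Prop := ∀ (response : String), Dom_parse_llm_yaml_response response → Spec_parse_llm_yaml_response response (parse_llm_yaml_response response)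

-- ===== LEMMAS AND PROOFS =====

-- A's in-section loop, as a direct recursion over the (already stripped) remaining lines
def pvParse2 (cur : PySem.Dict String String) : List String → List (PySem.Dict String String)
  | [] => if !cur.items.isEmpty && cur.contains "pattern" then [cur] else []
  | s :: l =>
    if s = "idioms:" then pvParse2 cur l
    else if pvIsPat s then
      (if !cur.items.isEmpty then
        cur :: pvParse2 (PySem.Dict.ofList [("pattern", pvVal s)]) l
      else pvParse2 (PySem.Dict.ofList [("pattern", pvVal s)]) l)
    else if PySem.Str.startswith s "reason:" && !cur.items.isEmpty then
      pvParse2 (cur.insert "reason" (pvVal s)) l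
    else if PySem.Str.startswith s "domain:" && !cur.items.isEmpty then
      pvParse2 (cur.insert "domain" (pvVal s)) l
    else pvParse2 cur l

lemma pv_isEmpty_false_of_contains (d : PySem.Dict String String)
    (h : d.contains "pattern" = true) : d.items.isEmpty = false := by
  rw [PySem.Dict.contains_iff_mem_keys] at h
  simp only [PySem.Dict.keys] at h
  rcases List.mem_map.mp h with ⟨p, hp, _⟩
  simp [List.isEmpty_eq_false_iff, List.ne_nil_of_mem hp]

lemma pv_contains_insert_pattern (d : PySem.Dict String String) (k : String) (v : String)
    (h : d.contains "pattern" = true) : (d.insert k v).contains "pattern" = true := by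
  simp [PySem.Dict.contains_insert, h]

lemma pv_ofList_contains (v : String) :
    (PySem.Dict.ofList [("pattern", v)]).contains "pattern" = true := by
  simp [PySem.Dict.ofList, PySem.Dict.update, PySem.Dict.contains_insert_self]

lemma pvL1 (l : List String) (id : List (PySem.Dict String String))
    (cur : PySem.Dict String String) :
    pvFinA (l.foldl pvStepA (id, true, cur)) = id ++ pvParse2 cur (l.map PySem.Str.strip) := by
  induction l generalizing id cur with
  | nil =>
    simp only [List.foldl_nil, List.map_nil, pvFinA, pvParse2]
    split <;> simp
  | cons s l ih =>
    simp only [List.foldl_cons, List.map_cons, pvStepA, pvParse2, pvIsPat]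
    by_cases h1 : PySem.Str.strip s = "idioms:"
    · simp only [h1, if_true]
      exact ih id cur
    · simp only [h1, if_false, Bool.not_true, Bool.false_eq_true]
      by_cases h2 : PySem.Str.startswith (PySem.Str.strip s) "- pattern:" = true
      · simp only [h2, if_true]
        split_ifs with he
        · rw [ih]; simp
        · exact ih _ _
      · simp only [h2]
        split_ifs <;> first | exact ih _ _ | (rw [ih]; simp)

lemma pvP (l : List String) :
    (pvParse2 PySem.Dict.empty l = (pvBlocks l).map pvBuild) ∧
    (∀ d : PySem.Dict String String, d.contains "pattern" = true →
      pvParse2 d l =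
        (l.takeWhile (fun t => !pvIsPat t)).foldl pvBuildStep d ::
          (pvBlocks (l.dropWhile (fun t => !pvIsPat t))).map pvBuild) := by
  induction l with
  | nil =>
    constructor
    · simp [pvParse2, pvBlocks]
    · intro d hd
      simp [pvParse2, pvBlocks, pv_isEmpty_false_of_contains d hd, hd]
  | cons s l ih =>
    have hBlocksPat : ∀ (h : pvIsPat s = true), pvBlocks (s :: l) =
        (s :: l.takeWhile (fun t => !pvIsPat t)) :: pvBlocks (l.dropWhile (fun t => !pvIsPat t)) := by
      intro h; rw [pvBlocks, if_pos h]
    have hBlocksNot : ∀ (h : ¬ pvIsPat s = true), pvBlocks (s :: l) = pvBlocks l := by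
      intro h; rw [pvBlocks, if_neg h]
    have hE : (!(PySem.Dict.empty : PySem.Dict String String).items.isEmpty) = false := by rfl
    constructor
    · by_cases h1 : s = "idioms:"
      · subst h1
        have hp : pvParse2 PySem.Dict.empty ("idioms:" :: l) = pvParse2 PySem.Dict.empty l := by
          simp [pvParse2]
        rw [hp, ih.1, hBlocksNot (by decide)]
      · by_cases h2 : pvIsPat s = true
        · have hp : pvParse2 PySem.Dict.empty (s :: l) =
              pvParse2 (PySem.Dict.ofList [("pattern", pvVal s)]) l := by
            simp only [pvParse2]
            rw [if_neg h1, if_pos h2, if_neg (by rw [hE]; exact Bool.false_ne_true)]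
          rw [hp, ih.2 _ (pv_ofList_contains _), hBlocksPat h2, List.map_cons]
          rfl
        · have h2' : PySem.Str.startswith s "- pattern:" = false := by simpa [pvIsPat] using h2
          have hp : pvParse2 PySem.Dict.empty (s :: l) = pvParse2 PySem.Dict.empty l := by
            simp only [pvParse2]
            rw [if_neg h1, if_neg h2, if_neg (by rw [hE]; simp), if_neg (by rw [hE]; simp)]
          rw [hp, ih.1, hBlocksNot h2]
    · intro d hd
      have hne : (!d.items.isEmpty) = true := by
        simp [pv_isEmpty_false_of_contains d hd]
      by_cases h2 : pvIsPat s = true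
      · have h1 : ¬ s = "idioms:" := by
          intro h; rw [h] at h2; exact absurd h2 (by decide)
        have hp : pvParse2 d (s :: l) =
            d :: pvParse2 (PySem.Dict.ofList [("pattern", pvVal s)]) l := by
          simp only [pvParse2]
          rw [if_neg h1, if_pos h2, if_pos hne]
        have htw : List.takeWhile (fun t => !pvIsPat t) (s :: l) = [] := by
          rw [List.takeWhile_cons]; simp [h2]
        have hdw : List.dropWhile (fun t => !pvIsPat t) (s :: l) = s :: l := by
          rw [List.dropWhile_cons]; simp [h2]
        rw [hp, htw, hdw, List.foldl_nil, hBlocksPat h2, List.map_cons,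
          ih.2 _ (pv_ofList_contains _)]
        rfl
      · have h2f : pvIsPat s = false := Bool.eq_false_iff.mpr h2
        have htw : List.takeWhile (fun t => !pvIsPat t) (s :: l) =
            s :: List.takeWhile (fun t => !pvIsPat t) l := by
          rw [List.takeWhile_cons]; simp [h2f]
        have hdw : List.dropWhile (fun t => !pvIsPat t) (s :: l) =
            List.dropWhile (fun t => !pvIsPat t) l := by
          rw [List.dropWhile_cons]; simp [h2f]
        rw [htw, hdw, List.foldl_cons]
        by_cases h1 : s = "idioms:"
        · have hp : pvParse2 d (s :: l) = pvParse2 d l := by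
            simp only [pvParse2]; rw [if_pos h1]
          have hb : pvBuildStep d s = d := by
            subst h1; unfold pvBuildStep
            rw [if_neg (by decide), if_neg (by decide)]
          rw [hp, hb, ih.2 d hd]
        · by_cases h3 : PySem.Str.startswith s "reason:" = true
          · have hp : pvParse2 d (s :: l) = pvParse2 (d.insert "reason" (pvVal s)) l := by
              simp only [pvParse2]
              rw [if_neg h1, if_neg h2, if_pos (by rw [h3, hne]; rfl)]
            have hb : pvBuildStep d s = d.insert "reason" (pvVal s) := by
              unfold pvBuildStep; rw [if_pos h3]
            rw [hp, hb, ih.2 _ (pv_contains_insert_pattern d _ _ hd)]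
          · by_cases h4 : PySem.Str.startswith s "domain:" = true
            · have hp : pvParse2 d (s :: l) = pvParse2 (d.insert "domain" (pvVal s)) l := by
                simp only [pvParse2]
                rw [if_neg h1, if_neg h2, if_neg (by rw [Bool.eq_false_iff.mpr h3]; simp), if_pos (by rw [h4, hne]; rfl)]
              have hb : pvBuildStep d s = d.insert "domain" (pvVal s) := by
                unfold pvBuildStep
                rw [if_neg (by rw [Bool.eq_false_iff.mpr h3]; simp), if_pos h4]
              rw [hp, hb, ih.2 _ (pv_contains_insert_pattern d _ _ hd)]
            · have hp : pvParse2 d (s :: l) = pvParse2 d l := by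
                simp only [pvParse2]
                rw [if_neg h1, if_neg h2, if_neg (by rw [Bool.eq_false_iff.mpr h3]; simp), if_neg (by rw [Bool.eq_false_iff.mpr h4]; simp)]
              have hb : pvBuildStep d s = d := by
                unfold pvBuildStep
                rw [if_neg (by rw [Bool.eq_false_iff.mpr h3]; simp), if_neg (by rw [Bool.eq_false_iff.mpr h4]; simp)]
              rw [hp, hb, ih.2 d hd]

lemma pvP1 (l : List String) (id : List (PySem.Dict String String)) :
    pvFinA (l.foldl pvStepA (id, false, PySem.Dict.empty)) =
      match PySem.List.index? (l.map PySem.Str.strip) "idioms:" with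
      | none => id
      | some i => id ++ pvParse2 PySem.Dict.empty ((l.map PySem.Str.strip).drop (i + 1)) := by
  induction l generalizing id with
  | nil => simp [pvFinA, PySem.List.index?]
  | cons s l ih =>
    simp only [List.foldl_cons, List.map_cons, pvStepA]
    by_cases h1 : PySem.Str.strip s = "idioms:"
    · rw [if_pos h1, h1, PySem.List.index?_cons_self]
      simpa using pvL1 l id PySem.Dict.empty
    · rw [if_neg h1]
      simp only [Bool.not_false, if_true]
      rw [ih, PySem.List.index?_cons_of_ne (l.map PySem.Str.strip) h1]
      cases h : PySem.List.index? (l.map PySem.Str.strip) "idioms:" <;> simp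

-- ===== VERDICT (by name: the statement is the Claim_ definition above) =====
theorem parse_llm_yaml_response_spec : Claim_equal_parse_llm_yaml_response := by
  intro response _
  unfold Spec_parse_llm_yaml_response parse_llm_yaml_response parse_llm_yaml_response_alt
  rw [pvP1]
  cases h : PySem.List.index? ((PySem.Str.splitlines response).map PySem.Str.strip) "idioms:" with
  | none =>
    rw [PySem.List.index?_eq_idxOf?] at h
    simp [h]
  | some i =>
    rw [PySem.List.index?_eq_idxOf?] at h
    simp [h, (pvP _).1]
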